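-- pv_equiv track=rewrite | github.com/Bl4ckh34d/just-download-it | ui/settings_panel.py | _detect_url_formats
-- ===== SOURCE A (Python) =====
-- def _detect_url_formats(urls: list) -> tuple[bool, bool]:
--     """Detect if URLs contain audio or video formats"""
--     audio_formats = ['.mp3', '.m4a', '.wav', '.flac', '.aac', '.ogg', '.wma']
--     video_formats = ['.mp4', '.avi', '.mkv', '.mov', '.wmv', '.flv', '.webm', '.m4v']
--
--     has_audio_urls = False
--     has_video_urls = False
--
--     for url in urls:
--         url_lower = url.lower()
--
--         # Check for YouTube URLs (can contain both audio and video)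
--         if 'youtube.com' in url_lower or 'youtu.be' in url_lower:
--             has_audio_urls = True
--             has_video_urls = True
--             continue
--
--         # Check for audio formats
--         if any(format_ext in url_lower for format_ext in audio_formats):
--             has_audio_urls = True
--
--         # Check for video formats
--         if any(format_ext in url_lower for format_ext in video_formats):
--             has_video_urls = True
--
--     return has_audio_urls, has_video_urls
-- ===== SOURCE B (Python) =====
-- def _detect_url_formats(urls: list) -> tuple[bool, bool]:
--     """Detect if URLs contain audio or video formats (two independent passes)."""
--     audio_formats = ['.mp3', '.m4a', '.wav', '.flac', '.aac', '.ogg', '.wma']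
--     video_formats = ['.mp4', '.avi', '.mkv', '.mov', '.wmv', '.flv', '.webm', '.m4v']
--
--     def is_youtube(u):
--         return 'youtube.com' in u or 'youtu.be' in u
--
--     has_audio_urls = any(is_youtube(u.lower()) or any(f in u.lower() for f in audio_formats) for u in urls)
--     has_video_urls = any(is_youtube(u.lower()) or any(f in u.lower() for f in video_formats) for u in urls)
--     return has_audio_urls, has_video_urls
-- ===== Notes on version B (the rewrite author's own statement) =====
-- stated objective: simpler
-- what changed: Replaces A's single loop threading a two-flag accumulator with two independent any() passes over the urls, each with the YouTube test folded into its per-URL predicate.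
import Mathlib
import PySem

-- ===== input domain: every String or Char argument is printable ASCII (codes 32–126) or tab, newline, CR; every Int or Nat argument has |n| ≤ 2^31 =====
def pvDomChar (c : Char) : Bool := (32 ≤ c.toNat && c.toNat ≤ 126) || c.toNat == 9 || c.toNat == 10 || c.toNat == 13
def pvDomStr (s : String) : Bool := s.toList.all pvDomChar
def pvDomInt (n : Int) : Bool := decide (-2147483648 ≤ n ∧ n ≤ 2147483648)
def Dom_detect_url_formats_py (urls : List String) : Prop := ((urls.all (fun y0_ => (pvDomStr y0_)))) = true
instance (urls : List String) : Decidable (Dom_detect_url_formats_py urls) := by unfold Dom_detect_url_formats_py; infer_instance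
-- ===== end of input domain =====

-- B replaces A's single loop with a two-flag accumulator by two independent any-passes over urls (simpler decomposition, same cost).


-- ===== PORT A =====
def pvAudioFormats : List String := [".mp3", ".m4a", ".wav", ".flac", ".aac", ".ogg", ".wma"]
def pvVideoFormats : List String := [".mp4", ".avi", ".mkv", ".mov", ".wmv", ".flv", ".webm", ".m4v"]

def detect_url_formats_py (urls : List String) : Bool × Bool :=
  urls.foldl (fun (st : Bool × Bool) url =>
    let url_lower := PySem.Str.lower url
    if PySem.Str.isIn "youtube.com" url_lower || PySem.Str.isIn "youtu.be" url_lower then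
      (true, true)
    else
      (st.1 || pvAudioFormats.any (fun f => PySem.Str.isIn f url_lower),
       st.2 || pvVideoFormats.any (fun f => PySem.Str.isIn f url_lower)))
    (false, false)

-- ===== PORT B =====
def pvIsYoutube (u : String) : Bool :=
  PySem.Str.isIn "youtube.com" u || PySem.Str.isIn "youtu.be" u

def detect_url_formats_py_alt (urls : List String) : Bool × Bool :=
  (urls.any (fun u => pvIsYoutube (PySem.Str.lower u) ||
      pvAudioFormats.any (fun f => PySem.Str.isIn f (PySem.Str.lower u))),
   urls.any (fun u => pvIsYoutube (PySem.Str.lower u) ||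
      pvVideoFormats.any (fun f => PySem.Str.isIn f (PySem.Str.lower u))))

-- ===== PRECONDITION & SPEC =====
def Spec_detect_url_formats_py (urls : List String) (out : Bool × Bool) : Prop := out = detect_url_formats_py_alt urls
instance (urls : List String) (out : Bool × Bool) : Decidable (Spec_detect_url_formats_py urls out) := by unfold Spec_detect_url_formats_py; infer_instance

-- ===== CLAIM (what is proved, stated in full; the proofs are below) =====
def Claim_equal_detect_url_formats_py : Prop := ∀ (urls : List String), Dom_detect_url_formats_py urls → Spec_detect_url_formats_py urls (detect_url_formats_py urls)

-- ===== LEMMAS AND PROOFS =====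

-- A's fold over any accumulator (a, b) ORs each flag with an any-pass; generic in the per-URL predicates.
theorem fold_or_any {A : Type} (l : List A) (yt pa pv : A -> Bool) (a b : Bool) :
    l.foldl (fun (st : Bool × Bool) x =>
      if yt x then (true, true) else (st.1 || pa x, st.2 || pv x)) (a, b)
    = (a || l.any (fun x => yt x || pa x), b || l.any (fun x => yt x || pv x)) := by
  induction l generalizing a b with
  | nil => simp
  | cons u us ih =>
    by_cases h : yt u = true
    · simp [h, ih]
    · simp only [Bool.not_eq_true] at h
      simp [h, ih, Bool.or_assoc]

-- ===== VERDICT (by name: the statement is the Claim_ definition above) =====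
theorem detect_url_formats_py_spec : Claim_equal_detect_url_formats_py := by
  intro urls _
  unfold Spec_detect_url_formats_py detect_url_formats_py detect_url_formats_py_alt
  exact (fold_or_any urls
    (fun u => PySem.Str.isIn "youtube.com" (PySem.Str.lower u) || PySem.Str.isIn "youtu.be" (PySem.Str.lower u))
    (fun u => pvAudioFormats.any (fun f => PySem.Str.isIn f (PySem.Str.lower u)))
    (fun u => pvVideoFormats.any (fun f => PySem.Str.isIn f (PySem.Str.lower u)))
    false false).trans (by simp [pvIsYoutube])
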